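-- pv_equiv track=rewrite | github.com/iliaman1/leetcode | problems/tmp_traning.py | get_max_bowling_score
-- ===== SOURCE A (Python) =====
-- def get_max_bowling_score(lst: list) -> int:
--     if not lst:
--         return 0
--
--     return max(
--         get_max_bowling_score(lst[1:]),
--         get_max_bowling_score(lst[1:]) + lst[0],
--         get_max_bowling_score(lst[2:]) + lst[0] * lst[1]) if len(lst) >= 2 else max(
--         get_max_bowling_score(lst[1:]),
--         get_max_bowling_score(lst[1:]) + lst[0]
--     )
-- ===== SOURCE B (Python) =====
-- def get_max_bowling_score(lst: list) -> int:
--     # One backward pass suffix DP: a = best for suffix i+1, b = best for suffix i+2,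
--     # prev = lst[i+1]; replaces A's exponential triple recursion.
--     a = b = 0
--     prev = None
--     for x in reversed(lst):
--         if prev is None:
--             cur = max(a, a + x)
--         else:
--             cur = max(a, a + x, b + x * prev)
--         a, b, prev = cur, a, x
--     return a
-- ===== Notes on version B (the rewrite author's own statement) =====
-- stated objective: faster
-- what changed: Replaced A's exponential triple recursion over suffixes with a single backward pass keeping the DP values of the next two suffixes in two accumulators.
import Mathlib
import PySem

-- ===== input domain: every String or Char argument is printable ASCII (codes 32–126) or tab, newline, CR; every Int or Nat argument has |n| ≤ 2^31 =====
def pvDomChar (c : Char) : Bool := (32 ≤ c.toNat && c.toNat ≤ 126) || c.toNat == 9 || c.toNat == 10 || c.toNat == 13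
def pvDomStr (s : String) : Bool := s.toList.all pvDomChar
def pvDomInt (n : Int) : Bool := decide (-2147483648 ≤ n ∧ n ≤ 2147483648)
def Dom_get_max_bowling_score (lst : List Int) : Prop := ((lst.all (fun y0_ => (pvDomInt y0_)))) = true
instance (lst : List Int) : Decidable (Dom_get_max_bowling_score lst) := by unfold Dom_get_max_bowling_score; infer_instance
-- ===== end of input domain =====

-- B replaces A's exponential recursion with a linear backward suffix DP (return value only; no mutation).
-- ===== PORT A =====
def get_max_bowling_score (lst : List Int) : Int :=
  match lst with
  | [] => 0
  | [x] =>
      max (get_max_bowling_score ([] : List Int)) (get_max_bowling_score ([] : List Int) + x)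
  | x :: y :: rest =>
      max (max (get_max_bowling_score (y :: rest)) (get_max_bowling_score (y :: rest) + x))
          (get_max_bowling_score rest + x * y)

-- ===== PORT B =====
def bstep (st : Int × Int × Option Int) (x : Int) : Int × Int × Option Int :=
  match st with
  | (a, b, prev) =>
    let cur := match prev with
      | none => max a (a + x)
      | some p => max (max a (a + x)) (b + x * p)
    (cur, a, some x)

def get_max_bowling_score_alt (lst : List Int) : Int :=
  (lst.reverse.foldl bstep (0, 0, none)).1

-- ===== PRECONDITION & SPEC =====
def Spec_get_max_bowling_score (lst : List Int) (out : Int) : Prop := out = get_max_bowling_score_alt lst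
instance (lst : List Int) (out : Int) : Decidable (Spec_get_max_bowling_score lst out) := by unfold Spec_get_max_bowling_score; infer_instance

-- ===== CLAIM (what is proved, stated in full; the proofs are below) =====
def Claim_equal_get_max_bowling_score : Prop := ∀ (lst : List Int), Dom_get_max_bowling_score lst → Spec_get_max_bowling_score lst (get_max_bowling_score lst)

-- ===== LEMMAS AND PROOFS =====

-- ===== VERDICT (by name: the statement is the Claim_ definition above) =====
lemma bfold_char (s : List Int) :
    s.reverse.foldl bstep (0, 0, none) =
      (get_max_bowling_score s, get_max_bowling_score s.tail, s.head?) := by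
  induction s with
  | nil => simp [get_max_bowling_score]
  | cons x t ih =>
      rw [List.reverse_cons, List.foldl_append, ih]
      cases t with
      | nil => simp [bstep, get_max_bowling_score]
      | cons y r => simp [bstep, get_max_bowling_score]

theorem get_max_bowling_score_spec : Claim_equal_get_max_bowling_score := by
  intro lst _
  unfold Spec_get_max_bowling_score get_max_bowling_score_alt
  rw [bfold_char]
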